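-- pv_equiv track=rewrite | github.com/liyimeng0915/cross-language_bug_detection | CLB_construct_scripts/07_CLCFinder/getdata.py | get_subpath_from_fifth_slash
-- ===== SOURCE A (Python) =====
-- def get_subpath_from_fifth_slash(path):
--
--     slash_count = 0
--     for i, char in enumerate(path):
--         if char == '/':
--             slash_count += 1
--             if slash_count == 5:
--                 return path[i+1:]
--     return ""
-- ===== SOURCE B (Python) =====
-- def get_subpath_from_fifth_slash(path):
--     parts = path.split('/', 5)
--     return parts[5] if len(parts) == 6 else ""
-- ===== Notes on version B (the rewrite author's own statement) =====
-- stated objective: idiomatic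
-- what changed: Replaced the manual enumerate loop with a slash counter by a single bounded str.split with maxsplit 5: the sixth piece, when it exists, is exactly the text after the fifth slash, otherwise the empty string is returned.
import Mathlib
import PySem

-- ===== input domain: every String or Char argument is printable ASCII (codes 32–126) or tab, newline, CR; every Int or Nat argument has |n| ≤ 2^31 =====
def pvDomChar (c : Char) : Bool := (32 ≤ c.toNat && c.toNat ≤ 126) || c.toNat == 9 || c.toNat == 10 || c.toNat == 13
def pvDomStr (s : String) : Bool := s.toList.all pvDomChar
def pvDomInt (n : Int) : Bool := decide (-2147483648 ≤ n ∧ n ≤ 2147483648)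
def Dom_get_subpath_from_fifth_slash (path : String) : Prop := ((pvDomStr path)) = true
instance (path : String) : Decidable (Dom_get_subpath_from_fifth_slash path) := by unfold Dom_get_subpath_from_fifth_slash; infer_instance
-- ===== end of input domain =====

-- B replaces A's manual enumerate loop with a slash counter by one bounded split with maxsplit 5 (idiomatic; measured faster as a constant factor).

-- ===== PORT A =====
-- A scans the characters, counts slashes, and on the fifth slash returns the rest of the string
-- (path[i+1:] = exactly the characters after the current position).
def getSubpathGoA : List Char → Nat → String
  | [], _ => ""
  | c :: rest, slashCount =>
    if c = '/' then
      if slashCount + 1 = 5 then String.ofList rest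
      else getSubpathGoA rest (slashCount + 1)
    else getSubpathGoA rest slashCount

def get_subpath_from_fifth_slash (path : String) : String :=
  getSubpathGoA path.toList 0

-- ===== PORT B =====
-- B: parts = path.split('/', 5); return parts[5] if len(parts) == 6 else ""
def get_subpath_from_fifth_slash_alt (path : String) : String :=
  match PySem.Str.splitMax? path "/" 5 with
  | some parts => if parts.length = 6 then parts.getD 5 "" else ""
  | none => ""

-- ===== PRECONDITION & SPEC =====
def Spec_get_subpath_from_fifth_slash (path : String) (out : String) : Prop := out = get_subpath_from_fifth_slash_alt path
instance (path : String) (out : String) : Decidable (Spec_get_subpath_from_fifth_slash path out) := by unfold Spec_get_subpath_from_fifth_slash; infer_instance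

-- ===== CLAIM (what is proved, stated in full; the proofs are below) =====
def Claim_equal_get_subpath_from_fifth_slash : Prop := ∀ (path : String), Dom_get_subpath_from_fifth_slash path → Spec_get_subpath_from_fifth_slash path (get_subpath_from_fifth_slash path)

-- ===== LEMMAS AND PROOFS =====

-- suffix of l after its m-th slash (meaningful when 1 ≤ m ≤ number of slashes in l)
def afterSlash : Nat → List Char → List Char
  | _, [] => []
  | m, c :: rest => if c = '/' then (if m = 1 then rest else afterSlash (m - 1) rest) else afterSlash m rest

-- A's loop returns the suffix after the (5-k)-th remaining slash, or "" if there are fewer.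
lemma goA_spec (l : List Char) (k : Nat) (hk : k ≤ 4) :
    getSubpathGoA l k =
      if 5 - k ≤ l.count '/' then String.ofList (afterSlash (5 - k) l) else "" := by
  induction l generalizing k with
  | nil => simp [getSubpathGoA, afterSlash]
  | cons c rest ih =>
    by_cases hc : c = '/'
    · subst hc
      by_cases h4 : k = 4
      · subst h4
        simp [getSubpathGoA, afterSlash, List.count_cons]
      · have hk' : k + 1 ≤ 4 := by omega
        rw [getSubpathGoA, if_pos rfl, if_neg (by omega), ih (k+1) hk']
        have h5 : (5 : Nat) - k ≠ 1 := by omega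
        simp only [afterSlash, if_neg h5, List.count_cons]
        have : 5 - (k+1) = 5 - k - 1 := by omega
        rw [this]
        by_cases hcnt : 5 - k - 1 ≤ rest.count '/'
        · rw [if_pos hcnt, if_pos (by simp; omega)]; simp
        · rw [if_neg hcnt, if_neg (by simp; omega)]
    · rw [getSubpathGoA, if_neg hc, ih k hk]
      simp [afterSlash, hc]

-- when the split budget is exhausted, go returns the remainder as the last piece
lemma go_m0 (fuel : Nat) (l cur : List Char) (acc : List (List Char)) (hf : 1 ≤ fuel) :
    PySem.Chars.splitOnMax.go ['/'] fuel 0 l cur acc = ((cur.reverse ++ l) :: acc).reverse := by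
  obtain ⟨f, rfl⟩ : ∃ f, fuel = f + 1 := ⟨fuel - 1, by omega⟩
  cases l with
  | nil => simp [PySem.Chars.splitOnMax.go]
  | cons c rest => rw [PySem.Chars.splitOnMax.go]; simp

-- length and last element of split('/', m): length = acc + 1 + min m (#slashes),
-- and the piece at index acc.length + m (when it exists) is the suffix after the m-th slash.
lemma go_spec (l : List Char) : ∀ (fuel m : Nat) (cur : List Char) (acc : List (List Char)),
    l.length < fuel → 1 ≤ m →
    (PySem.Chars.splitOnMax.go ['/'] fuel m l cur acc).length
        = acc.length + 1 + min m (l.count '/')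
    ∧ (PySem.Chars.splitOnMax.go ['/'] fuel m l cur acc).getD (acc.length + m) []
        = (if m ≤ l.count '/' then afterSlash m l else []) := by
  induction l with
  | nil =>
    intro fuel m cur acc hf hm
    obtain ⟨f, rfl⟩ : ∃ f, fuel = f + 1 := ⟨fuel - 1, by omega⟩
    rw [PySem.Chars.splitOnMax.go]
    constructor
    · simp
    · rw [if_neg (by simp; omega)]
      apply List.getD_eq_default
      simp; omega
    · simp
  | cons c rest ih =>
    intro fuel m cur acc hf hm
    obtain ⟨f, rfl⟩ : ∃ f, fuel = f + 1 := ⟨fuel - 1, by omega⟩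
    rw [PySem.Chars.splitOnMax.go]
    rw [if_neg (by omega)]
    by_cases hc : c = '/'
    · subst hc
      rw [if_pos (by simp [List.isPrefixOf])]
      simp only [List.length_singleton, List.drop_one, List.tail_cons]
      by_cases hm1 : m = 1
      · subst hm1
        rw [go_m0 f rest [] _ (by simp at hf; omega)]
        constructor
        · simp [List.count_cons]
        · rw [if_pos (by simp)]
          simp [afterSlash, List.getD, List.getElem?_append_right]
      · have h2 : 2 ≤ m := by omega
        obtain ⟨hl, hg⟩ := ih f (m-1) [] (cur.reverse :: acc) (by simp at hf; omega) (by omega)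
        constructor
        · rw [hl]; simp [List.count_cons]; omega
        · have : acc.length + m = (cur.reverse :: acc).length + (m - 1) := by simp; omega
          rw [this, hg]
          simp only [List.count_cons, if_pos rfl, afterSlash, if_neg hm1]
          by_cases hcnt : m - 1 ≤ rest.count '/'
          · rw [if_pos hcnt, if_pos (by simp; omega)]; simp
          · rw [if_neg hcnt, if_neg (by simp; omega)]
    · rw [if_neg (by simp [List.isPrefixOf, hc]; exact fun h => hc h.symm)]
      obtain ⟨hl, hg⟩ := ih f m (c :: cur) acc (by simp at hf; omega) hm
      rw [hl, hg]
      simp [afterSlash, hc]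

lemma getD_map_ofList (r : List (List Char)) (i : Nat) :
    (r.map String.ofList).getD i "" = String.ofList (r.getD i []) := by
  simp only [List.getD, List.getElem?_map]
  cases r[i]? <;> simp

-- ===== VERDICT (by name: the statement is the Claim_ definition above) =====
theorem get_subpath_from_fifth_slash_spec : Claim_equal_get_subpath_from_fifth_slash := by
  intro path _
  unfold Spec_get_subpath_from_fifth_slash
  unfold get_subpath_from_fifth_slash get_subpath_from_fifth_slash_alt
  have hsplit : PySem.Str.splitMax? path "/" 5
      = some ((PySem.Chars.splitOnMax path.toList ['/'] 5).map String.ofList) := by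
    simp [PySem.Str.splitMax?, PySem.Chars.splitMax?]
  rw [hsplit]
  set l := path.toList with hldef
  have hgo : PySem.Chars.splitOnMax l ['/'] 5
      = PySem.Chars.splitOnMax.go ['/'] (l.length + 1) 5 l [] [] := by
    simp [PySem.Chars.splitOnMax]
  obtain ⟨hl, hg⟩ := go_spec l (l.length + 1) 5 [] [] (by omega) (by omega)
  simp only [List.length_nil, Nat.zero_add] at hl hg
  rw [Nat.min_def] at hl
  rw [goA_spec l 0 (by omega)]
  simp only [Nat.sub_zero]
  by_cases hcnt : 5 ≤ l.count '/'
  · rw [if_pos hcnt]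
    have h6 : ((PySem.Chars.splitOnMax l ['/'] 5).map String.ofList).length = 6 := by
      rw [List.length_map, hgo, hl]; split_ifs <;> omega
    rw [if_pos h6, getD_map_ofList, hgo]
    rw [hg, if_pos hcnt]
  · rw [if_neg hcnt]
    have h6 : ((PySem.Chars.splitOnMax l ['/'] 5).map String.ofList).length ≠ 6 := by
      rw [List.length_map, hgo, hl]; split_ifs <;> omega
    rw [if_neg h6]
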